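-- pv_equiv track=rewrite | github.com/Folissa/Matura | transposition_cipher.py | transposition_consonants_decipher
-- ===== SOURCE A (Python) =====
-- def transposition_consonants_decipher(string):
--     string_length = len(string)
--     string_list = []
--     is_first = 1
--     first_value = ""
--     first_index = None
--     for char in string:
--         string_list.append(char)
--     for index in range(string_length - 1, -1, -1):
--         if is_a_consonant(string_list[index]):
--             if is_first:
--                 first_index = index
--                 first_value = string_list[index]
--                 is_first = 0
--             else:
--                 temporary = string_list[index]
--                 string_list[index] = first_value
--                 first_value = temporary
--     if not is_first:
--         string_list[first_index] = first_value
--     new_string = ""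
--     for char in string_list:
--         new_string += char
--     return new_string
--
-- def is_a_consonant(char):
--     vowels = {"a", "e",  "i", "o", "u", "y"}
--     if char in vowels:
--         return 0
--     else:
--         return 1
-- ===== SOURCE B (Python) =====
-- def is_a_consonant(char):
--     vowels = {"a", "e", "i", "o", "u", "y"}
--     return char not in vowels
--
--
-- def transposition_consonants_decipher(string):
--     chars = list(string)
--     positions = [i for i, c in enumerate(chars) if is_a_consonant(c)]
--     values = [c for c in chars if is_a_consonant(c)]
--     rotated = values[1:] + values[:1]
--     for p, v in zip(positions, rotated):
--         chars[p] = v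
--     return "".join(chars)
-- ===== Notes on version B (the rewrite author's own statement) =====
-- stated objective: simpler
-- what changed: A's single backward pass that threads a running carry value (with special first-consonant bookkeeping and a final fix-up write) is replaced by a forward decomposition: collect the consonant positions and values, rotate the value list by one, and scatter it back, then join.
import Mathlib
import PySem

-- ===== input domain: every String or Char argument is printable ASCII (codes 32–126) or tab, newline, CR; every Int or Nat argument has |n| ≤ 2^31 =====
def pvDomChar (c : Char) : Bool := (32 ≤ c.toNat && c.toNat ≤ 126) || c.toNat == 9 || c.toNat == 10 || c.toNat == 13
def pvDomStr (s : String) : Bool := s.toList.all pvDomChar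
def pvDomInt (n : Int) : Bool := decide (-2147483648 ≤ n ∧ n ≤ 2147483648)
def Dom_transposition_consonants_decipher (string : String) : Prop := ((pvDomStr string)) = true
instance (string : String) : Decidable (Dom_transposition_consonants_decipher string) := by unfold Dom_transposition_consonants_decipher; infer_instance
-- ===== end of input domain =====

-- B replaces A's backward carry-threading pass (with first-consonant bookkeeping and a
-- final fix-up write) by a forward decomposition: positions + values, rotate, scatter, join.

-- ===== PORT A =====
-- is_a_consonant returns Python ints 0/1 used only as truth values; modelled as Bool.
def is_a_consonant (char : Char) : Bool :=
  let vowels : List Char := ['a', 'e', 'i', 'o', 'u', 'y']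
  if char ∈ vowels then false else true

-- one iteration of A's backward loop, at index m; state = (string_list, is_first, first_value, first_index)
-- (Python's initial first_value = "" / first_index = None are never read before being set,
--  guarded by is_first; modelled by dummies ' ' and 0)
def pvAStep (m : Nat) (st : List Char × Bool × Char × Nat) : List Char × Bool × Char × Nat :=
  match st with
  | (l, isFirst, fv, fi) =>
    if is_a_consonant (l.getD m ' ') then
      if isFirst then (l, false, l.getD m ' ', m)
      else (l.set m fv, false, l.getD m ' ', fi)
    else (l, isFirst, fv, fi)

-- 'for index in range(string_length - 1, -1, -1)': indices m-1, m-2, …, 0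
def pvALoop : Nat → (List Char × Bool × Char × Nat) → (List Char × Bool × Char × Nat)
  | 0, st => st
  | m + 1, st => pvALoop m (pvAStep m st)

def transposition_consonants_decipher (string : String) : String :=
  let string_length := string.toList.length
  let string_list := string.toList.foldl (fun acc c => acc ++ [c]) []   -- the append loop
  match pvALoop string_length (string_list, true, ' ', 0) with
  | (l, isFirst, fv, fi) =>
    let l2 := if isFirst then l else l.set fi fv   -- 'if not is_first: string_list[first_index] = first_value'
    -- 'new_string += char' loop: string concatenation modelled on the char-list side
    -- (PySem convention), converted once at the end
    String.ofList (l2.foldl (fun acc c => acc ++ [c]) [])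

-- ===== PORT B =====
def pvIsConsonantB (char : Char) : Bool :=
  let vowels : List Char := ['a', 'e', 'i', 'o', 'u', 'y']
  !(char ∈ vowels)

def transposition_consonants_decipher_alt (string : String) : String :=
  let chars := string.toList
  let positions := ((PySem.List.enumerate chars 0).filter (fun ic => pvIsConsonantB ic.2)).map (·.1)
  let values := chars.filter (fun c => pvIsConsonantB c)
  let rotated := PySem.List.slice values (some 1) none ++ PySem.List.slice values none (some 1)
  let chars2 := (positions.zip rotated).foldl (fun l pv => PySem.List.pySetD l pv.1 pv.2) chars
  String.ofList chars2

-- ===== PRECONDITION & SPEC =====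
def Spec_transposition_consonants_decipher (string : String) (out : String) : Prop := out = transposition_consonants_decipher_alt string
instance (string : String) (out : String) : Decidable (Spec_transposition_consonants_decipher string out) := by unfold Spec_transposition_consonants_decipher; infer_instance

-- ===== CLAIM (what is proved, stated in full; the proofs are below) =====
def Claim_equal_transposition_consonants_decipher : Prop := ∀ (string : String), Dom_transposition_consonants_decipher string → Spec_transposition_consonants_decipher string (transposition_consonants_decipher string)

-- ===== LEMMAS AND PROOFS =====

-- the two consonant tests agree
theorem pvConsB_eq (c : Char) : pvIsConsonantB c = is_a_consonant c := by
  simp only [pvIsConsonantB, is_a_consonant]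
  by_cases h : c ∈ ['a', 'e', 'i', 'o', 'u', 'y'] <;> simp [h]

-- right-to-left carry pass: each consonant takes the carry coming from its right and
-- emits its own value leftwards; .2 is the outgoing carry (leftmost consonant value, or fv)
def pvSh (fv : Char) : List Char → List Char × Char
  | [] => ([], fv)
  | c :: t =>
    let p := pvSh fv t
    if is_a_consonant c then (p.2 :: p.1, c) else (c :: p.1, p.2)

-- split off the LAST consonant: l = xs ++ c :: ys with c a consonant and ys consonant-free
def pvLastSplit : List Char → Option (List Char × Char × List Char)
  | [] => none
  | c :: t =>
    match pvLastSplit t with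
    | some (xs, d, ys) => some (c :: xs, d, ys)
    | none => if is_a_consonant c then some ([], c, t) else none

-- replace consonants left-to-right by the given values (extra values unused; missing values keep chars)
def pvRep : List Char → List Char → List Char
  | _, [] => []
  | vs, c :: t =>
    if is_a_consonant c then
      match vs with
      | [] => c :: pvRep [] t
      | v :: vr => v :: pvRep vr t
    else c :: pvRep vs t

-- consonant positions, counted from k
def pvPos : Nat → List Char → List Nat
  | _, [] => []
  | k, c :: t => if is_a_consonant c then k :: pvPos (k + 1) t else pvPos (k + 1) t

theorem pvSh_length (fv : Char) (l : List Char) : (pvSh fv l).1.length = l.length := by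
  induction l with
  | nil => rfl
  | cons c t ih => simp only [pvSh]; split <;> simp [ih]

theorem pvSh_no_cons (fv : Char) (l : List Char) (h : l.filter is_a_consonant = []) :
    pvSh fv l = (l, fv) := by
  induction l with
  | nil => rfl
  | cons c t ih =>
    by_cases hc : is_a_consonant c
    · simp [hc] at h
    · have ht : t.filter is_a_consonant = [] := by
        rwa [List.filter_cons, if_neg (by simp [hc])] at h
      simp [pvSh, hc, ih ht]

theorem pvSh_snd (fv : Char) (l : List Char) :
    (pvSh fv l).2 = (l.filter is_a_consonant).headD fv := by
  induction l with
  | nil => rfl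
  | cons c t ih =>
    by_cases hc : is_a_consonant c <;> simp [pvSh, hc, ih]

theorem pvSh_append (fv c : Char) (xs : List Char) :
    pvSh fv (xs ++ [c]) =
      if is_a_consonant c then ((pvSh c xs).1 ++ [fv], (pvSh c xs).2)
      else ((pvSh fv xs).1 ++ [c], (pvSh fv xs).2) := by
  induction xs with
  | nil => by_cases hc : is_a_consonant c <;> simp [pvSh, hc]
  | cons x t ih =>
    by_cases hc : is_a_consonant c <;> by_cases hx : is_a_consonant x <;>
      simp [pvSh, hc, hx, ih]

theorem pvRep_nil_vals (l : List Char) : pvRep [] l = l := by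
  induction l with
  | nil => rfl
  | cons c t ih => simp only [pvRep]; split <;> simp [ih]

theorem pvRep_no_cons (vs : List Char) (l : List Char) (h : l.filter is_a_consonant = []) :
    pvRep vs l = l := by
  induction l generalizing vs with
  | nil => rfl
  | cons c t ih =>
    by_cases hc : is_a_consonant c
    · simp [hc] at h
    · have ht : t.filter is_a_consonant = [] := by
        rwa [List.filter_cons, if_neg (by simp [hc])] at h
      simp [pvRep, hc, ih _ ht]

theorem pvRep_append (vs a b : List Char) :
    pvRep vs (a ++ b) = pvRep vs a ++ pvRep (vs.drop (a.filter is_a_consonant).length) b := by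
  induction a generalizing vs with
  | nil => simp [pvRep]
  | cons c t ih =>
    by_cases hc : is_a_consonant c
    · cases vs with
      | nil => simp [pvRep, hc, ih]
      | cons v vr => simp [pvRep, hc, ih]
    · simp [pvRep, hc, ih]

theorem pvRep_sh (l : List Char) (fv : Char) (rest : List Char) :
    pvRep ((l.filter is_a_consonant).tail ++ fv :: rest) l = (pvSh fv l).1 := by
  induction l with
  | nil => rfl
  | cons c t ih =>
    by_cases hc : is_a_consonant c
    · simp only [List.filter_cons, hc, if_pos, List.tail_cons]
      rcases hft : t.filter is_a_consonant with _ | ⟨v, w⟩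
      · have hsh := pvSh_no_cons fv t hft
        simp [pvRep, hc, pvSh, hsh, pvRep_no_cons rest t hft]
      · have hhd : (pvSh fv t).2 = v := by simp [pvSh_snd, hft]
        have : w = (t.filter is_a_consonant).tail := by simp [hft]
        simp only [pvRep, hc, if_pos, List.cons_append, pvSh]
        simp [hhd, this ▸ ih]
    · simp [pvRep, hc, pvSh, ih]

theorem pvLastSplit_none (l : List Char) (h : pvLastSplit l = none) :
    l.filter is_a_consonant = [] := by
  induction l with
  | nil => rfl
  | cons c t ih =>
    simp only [pvLastSplit] at h
    rcases ht : pvLastSplit t with _ | ⟨xs, d, ys⟩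
    · rw [ht] at h
      by_cases hc : is_a_consonant c
      · simp [hc] at h
      · simp [hc, ih ht]
    · rw [ht] at h; simp at h

theorem pvLastSplit_some (l xs : List Char) (c : Char) (ys : List Char)
    (h : pvLastSplit l = some (xs, c, ys)) :
    l = xs ++ c :: ys ∧ is_a_consonant c = true ∧ ys.filter is_a_consonant = [] := by
  induction l generalizing xs c ys with
  | nil => simp [pvLastSplit] at h
  | cons a t ih =>
    simp only [pvLastSplit] at h
    rcases ht : pvLastSplit t with _ | ⟨xs', d, ys'⟩
    · rw [ht] at h
      by_cases hc : is_a_consonant a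
      · simp [hc] at h
        obtain ⟨h1, h2, h3⟩ := h
        subst h1; subst h2; subst h3
        exact ⟨rfl, hc, pvLastSplit_none t ht⟩
      · simp [hc] at h
    · rw [ht] at h
      simp at h
      obtain ⟨h1, h2, h3⟩ := h
      obtain ⟨rfl, hd, hys⟩ := ih xs' d ys' ht
      subst h2; subst h3
      rcases xs with _ | ⟨x, xr⟩
      · simp at h1
      · simp at h1; obtain ⟨rfl, rfl⟩ := h1; exact ⟨by simp, hd, hys⟩

theorem pvLastSplit_append (xs : List Char) (c : Char) :
    pvLastSplit (xs ++ [c]) =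
      if is_a_consonant c then some (xs, c, [])
      else match pvLastSplit xs with
           | some (a, d, b) => some (a, d, b ++ [c])
           | none => none := by
  induction xs with
  | nil => by_cases hc : is_a_consonant c <;> simp [pvLastSplit, hc]
  | cons x t ih =>
    by_cases hc : is_a_consonant c
    · simp only [List.cons_append, pvLastSplit, ih, if_pos hc]
    · simp only [List.cons_append, pvLastSplit, ih, if_neg hc]
      rcases ht : pvLastSplit t with _ | ⟨a, d, b⟩ <;> by_cases hx : is_a_consonant x <;> simp [hx]

-- A's loop with is_first already cleared: a pvSh carry pass over the processed prefix
theorem pvALoop_false (m : Nat) (l : List Char) (fv : Char) (fi : Nat) (hm : m ≤ l.length) :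
    pvALoop m (l, false, fv, fi) =
      ((pvSh fv (l.take m)).1 ++ l.drop m, false, (pvSh fv (l.take m)).2, fi) := by
  induction m generalizing l fv with
  | zero => simp [pvALoop, pvSh]
  | succ m ih =>
    have hlt : m < l.length := hm
    have hget' : l[m]?.getD ' ' = l[m] := by simp [List.getElem?_eq_getElem hlt]
    have htake : l.take (m + 1) = l.take m ++ [l[m]] := by
      rw [List.take_add_one]; simp [hlt]
    have hdrop : l.drop m = l[m] :: l.drop (m + 1) := List.drop_eq_getElem_cons hlt
    by_cases hc : is_a_consonant l[m]
    · have hstep : pvAStep m (l, false, fv, fi) = (l.set m fv, false, l[m], fi) := by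
        simp only [pvAStep, List.getD, hget', hc, Bool.false_eq_true, if_false, if_true]
      rw [pvALoop, hstep, ih (l.set m fv) l[m] (by simp [hlt.le])]
      have h1 : (l.set m fv).take m = l.take m := by
        rw [List.take_set]; exact List.set_eq_of_length_le (by simp)
      have h2 : (l.set m fv).drop m = fv :: l.drop (m + 1) := by
        rw [List.drop_set, if_neg (lt_irrefl m), Nat.sub_self, List.drop_eq_getElem_cons hlt,
          List.set_cons_zero]
      rw [h1, h2, htake, pvSh_append, if_pos hc]
      simp only [List.append_assoc, List.cons_append, List.nil_append]
    · have hstep : pvAStep m (l, false, fv, fi) = (l, false, fv, fi) := by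
        simp only [pvAStep, List.getD, hget']
        rw [if_neg hc]
      rw [pvALoop, hstep, ih l fv hlt.le, htake, pvSh_append, if_neg hc]
      rw [hdrop]
      simp only [List.append_assoc, List.cons_append, List.nil_append]

-- A's loop from the initial state: search for the last consonant, then the carry pass
theorem pvALoop_true (m : Nat) (l : List Char) (fv : Char) (fi : Nat) (hm : m ≤ l.length) :
    pvALoop m (l, true, fv, fi) =
      match pvLastSplit (l.take m) with
      | none => (l, true, fv, fi)
      | some (xs, c, ys) =>
          ((pvSh c xs).1 ++ c :: (ys ++ l.drop m), false, (pvSh c xs).2, xs.length) := by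
  induction m generalizing fv fi with
  | zero => simp [pvALoop, pvLastSplit]
  | succ m ih =>
    have hlt : m < l.length := hm
    have hget' : l[m]?.getD ' ' = l[m] := by simp [List.getElem?_eq_getElem hlt]
    have htake : l.take (m + 1) = l.take m ++ [l[m]] := by
      rw [List.take_add_one]; simp [hlt]
    have hdrop : l.drop m = l[m] :: l.drop (m + 1) := List.drop_eq_getElem_cons hlt
    by_cases hc : is_a_consonant l[m]
    · have hstep : pvAStep m (l, true, fv, fi) = (l, false, l[m], m) := by
        simp only [pvAStep, List.getD, hget', hc, if_true]
      rw [pvALoop, hstep, pvALoop_false m l l[m] m hlt.le, htake,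
        pvLastSplit_append, if_pos hc]
      have hlen : (l.take m).length = m := List.length_take_of_le hlt.le
      rw [hdrop]
      simp only [List.nil_append, hlen]
    · have hstep : pvAStep m (l, true, fv, fi) = (l, true, fv, fi) := by
        simp only [pvAStep, List.getD, hget']
        rw [if_neg hc]
      rw [pvALoop, hstep, ih fv fi hlt.le, htake, pvLastSplit_append, if_neg hc]
      rcases hsp : pvLastSplit (l.take m) with _ | ⟨xs, c, ys⟩
      · simp
      · rw [hdrop]
        simp only [List.append_assoc, List.cons_append, List.nil_append]

-- B's position list is pvPos (cast to Int by enumerate)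
theorem pvPositions_eq (l : List Char) (k : Nat) :
    ((PySem.List.enumerate l (k : Int)).filter (fun ic => pvIsConsonantB ic.2)).map (·.1) =
      (pvPos k l).map Nat.cast := by
  induction l generalizing k with
  | nil => simp [PySem.List.enumerate_nil, pvPos]
  | cons c t ih =>
    rw [PySem.List.enumerate_cons, List.filter_cons]
    have iht := ih (k + 1)
    rw [show ((k + 1 : Nat) : Int) = (k : Int) + 1 by push_cast; ring] at iht
    simp only [pvConsB_eq] at iht
    by_cases hc : is_a_consonant c
    · simp only [pvConsB_eq, hc, if_pos, List.map_cons, pvPos, iht]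
    · simp only [pvConsB_eq, hc, Bool.false_eq_true, if_false, pvPos, iht]

-- pySetD on a Nat-cast index is List.set
theorem pvFoldl_pySetD (ps : List Nat) (vs l : List Char) :
    ((ps.map Nat.cast).zip vs).foldl (fun acc pv => PySem.List.pySetD acc pv.1 pv.2) l =
      (ps.zip vs).foldl (fun acc pv => acc.set pv.1 pv.2) l := by
  induction ps generalizing vs l with
  | nil => rfl
  | cons p pr ih =>
    cases vs with
    | nil => rfl
    | cons v vr =>
      simp only [List.map_cons, List.zip_cons_cons, List.foldl_cons, PySem.List.pySetD_natCast]
      exact ih vr _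

theorem pvSet_append_length (pre : List Char) (c v : Char) (t : List Char) :
    (pre ++ c :: t).set pre.length v = pre ++ v :: t := by
  induction pre with
  | nil => rfl
  | cons x xr ih => simp [ih]

-- the scatter loop IS sequential replacement
theorem pvScatter_eq (l pre vs : List Char) :
    ((pvPos pre.length l).zip vs).foldl (fun acc pv => acc.set pv.1 pv.2) (pre ++ l) =
      pre ++ pvRep vs l := by
  induction l generalizing pre vs with
  | nil => simp [pvPos, pvRep]
  | cons c t ih =>
    by_cases hc : is_a_consonant c
    · cases vs with
      | nil => simp [pvPos, hc, pvRep, pvRep_nil_vals]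
      | cons v vr =>
        simp only [pvPos, hc, List.zip_cons_cons, List.foldl_cons,
          pvSet_append_length, pvRep, if_pos]
        have := ih (pre ++ [v]) vr
        simpa using this
    · simp only [pvPos, pvRep, hc, Bool.false_eq_true, if_neg, not_false_iff]
      have := ih (pre ++ [c]) vs
      simpa using this

-- ===== VERDICT (by name: the statement is the Claim_ definition above) =====
theorem transposition_consonants_decipher_spec : Claim_equal_transposition_consonants_decipher := by
  intro s _
  unfold Spec_transposition_consonants_decipher
  unfold transposition_consonants_decipher transposition_consonants_decipher_alt
  set l := s.toList with hl
  simp only [PySem.List.foldl_append_singleton, List.nil_append]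
  -- B side normalisation
  have hpos := pvPositions_eq l 0
  simp only [Nat.cast_zero] at hpos
  rw [hpos]
  simp only [pvConsB_eq]
  rw [PySem.List.slice_from_one]
  rw [PySem.List.slice_to _ (show (0 : Int) ≤ 1 by norm_num)]
  rw [pvFoldl_pySetD]
  have hscatter := pvScatter_eq l [] ((l.filter is_a_consonant).tail ++ (l.filter is_a_consonant).take ((1 : Int)).toNat)
  simp only [List.length_nil, List.nil_append] at hscatter
  rw [hscatter]
  -- A side normalisation
  rw [pvALoop_true l.length l ' ' 0 le_rfl]
  rw [List.take_length, List.drop_length]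
  rcases hsp : pvLastSplit l with _ | ⟨xs, c, ys⟩
  · -- no consonant at all
    have hf : l.filter is_a_consonant = [] := pvLastSplit_none l hsp
    simp [hf, pvRep_nil_vals]
  · obtain ⟨hdecomp, hc, hys⟩ := pvLastSplit_some l xs c ys hsp
    simp only
    -- A's final fix-up write
    have hset : ((pvSh c xs).1 ++ c :: (ys ++ [])).set xs.length ((pvSh c xs).2) =
        (pvSh c xs).1 ++ (pvSh c xs).2 :: ys := by
      rw [List.append_nil, ← pvSh_length c xs, pvSet_append_length]
    rw [if_neg (by simp), hset]
    -- B's value list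
    have hfl : l.filter is_a_consonant = xs.filter is_a_consonant ++ [c] := by
      rw [hdecomp]; simp [hc, hys]
    rw [hfl]
    rcases hw : xs.filter is_a_consonant with _ | ⟨v, w⟩
    · -- single consonant
      have hsh := pvSh_no_cons c xs hw
      rw [hdecomp]
      simp only [List.nil_append, List.tail_cons, hsh]
      rw [pvRep_append]
      simp only [hw, List.length_nil, List.drop_zero]
      rw [pvRep_no_cons _ xs hw]
      rw [show List.take (Int.toNat 1) [c] = [c] from rfl]
      rw [show pvRep [c] (c :: ys) = c :: ys by simp [pvRep, hc, pvRep_nil_vals]]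
    · -- at least two consonants
      have hrot : ((v :: w) ++ [c]).tail ++ ((v :: w) ++ [c]).take (1 : Int).toNat =
          (w ++ [c]) ++ [v] := by simp
      rw [hrot, hdecomp, pvRep_append]
      have hlen : ((w ++ [c]).length : Nat) = (xs.filter is_a_consonant).length := by
        simp [hw]
      have hdropped : ((w ++ [c]) ++ [v]).drop (xs.filter is_a_consonant).length = [v] := by
        rw [← hlen, List.drop_left]
      rw [hdropped]
      have hrep1 : pvRep ((w ++ [c]) ++ [v]) xs = (pvSh c xs).1 := by
        have hw' : (xs.filter is_a_consonant).tail = w := by simp [hw]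
        have := pvRep_sh xs c [v]
        rw [hw'] at this
        simpa using this
      rw [hrep1]
      have hrep2 : pvRep [v] (c :: ys) = v :: ys := by
        simp [pvRep, hc, pvRep_no_cons _ ys hys]
      rw [hrep2]
      have hsnd : (pvSh c xs).2 = v := by simp [pvSh_snd, hw]
      rw [hsnd]
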